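-- pv_equiv track=rewrite | github.com/Phunyawee/NetworkProgramming | XO/ox.py | TheTrain
-- ===== SOURCE A (Python) =====
-- def TheTrain(x):#data '[round]{win}<lose>(draw)'
--     result = []
--     distance = 0
--     distanceWin = 0
--     distancelose = 0
--     distancedraw = 0
--     state = False
--     stateWin = False
--     statelose = False
--     statedraw = False
--     for i in range(len(x)):
--         if x[i]=='[':
--             state = True
--         if x[i]==']':
--             state = False
--         if state:
--             distance+=1
--
--         if x[i]=='{':
--             stateWin = True
--         if x[i]=='}':
--             stateWin = False
--         if stateWin:
--             distanceWin+=1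
--
--         if x[i]=='<':
--             statelose = True
--         if x[i]=='>':
--             statelose = False
--         if statelose:
--             distancelose+=1
--
--         if x[i]=='(':
--             statedraw = True
--         if x[i]==')':
--             statedraw = False
--         if statedraw:
--             distancedraw+=1
--
--     result.append(x[1:distance])
--     result.append(x[distance+2:distance+1+distanceWin])
--     result.append(x[distance+1+distanceWin+2:distance+1+distanceWin+1+distancelose])
--     result.append(x[distance+1+distanceWin+1+distancelose+2:distance+1+distanceWin+1+distancelose+1+distancedraw])
--     distance = 0
--     distanceWin = 0
--     distancelose = 0
--     distancedraw = 0
--     return result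
-- ===== SOURCE B (Python) =====
-- def count_inside(s, o, c):
--     # run-length accounting: record where an inside-run starts, add its length when it closes
--     total = 0
--     start = None
--     i = 0
--     for ch in s:
--         if ch == o and start is None:
--             start = i
--         elif ch == c and start is not None:
--             total += i - start
--             start = None
--         i += 1
--     if start is not None:
--         total += len(s) - start
--     return total
--
--
-- def TheTrain(x):
--     d = count_inside(x, '[', ']')
--     w = count_inside(x, '{', '}')
--     l = count_inside(x, '<', '>')
--     r = count_inside(x, '(', ')')
--     return [x[1:d],
--             x[d + 2:d + 1 + w],
--             x[d + 1 + w + 2:d + 1 + w + 1 + l],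
--             x[d + 1 + w + 1 + l + 2:d + 1 + w + 1 + l + 1 + r]]
-- ===== Notes on version B (the rewrite author's own statement) =====
-- stated objective: alternative
-- what changed: A's single fused pass with four boolean flags and four per-character counters is replaced by a helper doing run-length accounting (record the index where an inside-run starts, add the run's length when the closer arrives, flush the open run against len(s) at the end), called once per bracket kind; the four slice expressions stay the same.
import Mathlib
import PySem

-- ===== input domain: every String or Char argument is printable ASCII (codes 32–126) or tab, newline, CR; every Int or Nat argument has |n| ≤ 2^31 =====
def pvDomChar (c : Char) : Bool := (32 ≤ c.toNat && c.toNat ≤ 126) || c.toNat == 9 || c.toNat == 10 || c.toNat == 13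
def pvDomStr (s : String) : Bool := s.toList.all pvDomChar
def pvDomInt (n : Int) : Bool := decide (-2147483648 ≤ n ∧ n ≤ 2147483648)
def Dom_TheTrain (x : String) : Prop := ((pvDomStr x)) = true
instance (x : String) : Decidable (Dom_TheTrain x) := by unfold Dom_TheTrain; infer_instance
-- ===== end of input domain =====

-- B replaces A's fused four-flag per-character counting pass by a helper that does
-- run-length accounting (it records where an inside-run starts and adds the run's
-- length when it closes), called once per bracket kind; objective: alternative.

-- ===== PORT A =====
-- one fused loop step over all four counters/flags, in A's statement order
def pvStepAll (p : (Int × Int × Int × Int) × (Bool × Bool × Bool × Bool)) (ch : Char) :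
    (Int × Int × Int × Int) × (Bool × Bool × Bool × Bool) :=
  let s := if ch = '[' then true else p.2.1
  let s := if ch = ']' then false else s
  let d := if s then p.1.1 + 1 else p.1.1
  let sw := if ch = '{' then true else p.2.2.1
  let sw := if ch = '}' then false else sw
  let dw := if sw then p.1.2.1 + 1 else p.1.2.1
  let sl := if ch = '<' then true else p.2.2.2.1
  let sl := if ch = '>' then false else sl
  let dl := if sl then p.1.2.2.1 + 1 else p.1.2.2.1
  let sd := if ch = '(' then true else p.2.2.2.2
  let sd := if ch = ')' then false else sd
  let dd := if sd then p.1.2.2.2 + 1 else p.1.2.2.2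
  ((d, dw, dl, dd), (s, sw, sl, sd))

def TheTrain (x : String) : List String :=
  let fin := x.toList.foldl pvStepAll ((0, 0, 0, 0), (false, false, false, false))
  let d := fin.1.1
  let dw := fin.1.2.1
  let dl := fin.1.2.2.1
  let dd := fin.1.2.2.2
  [PySem.Str.slice x (some 1) (some d),
   PySem.Str.slice x (some (d + 2)) (some (d + 1 + dw)),
   PySem.Str.slice x (some (d + 1 + dw + 2)) (some (d + 1 + dw + 1 + dl)),
   PySem.Str.slice x (some (d + 1 + dw + 1 + dl + 2)) (some (d + 1 + dw + 1 + dl + 1 + dd))]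

-- ===== PORT B =====
-- state: (total, start-of-current-run (if inside), running index)
def pvStepRun (o c : Char) (p : Int × Option Int × Int) (ch : Char) : Int × Option Int × Int :=
  if ch = o ∧ p.2.1 = none then (p.1, some p.2.2, p.2.2 + 1)
  else match p.2.1 with
    | some j => if ch = c then (p.1 + (p.2.2 - j), none, p.2.2 + 1) else (p.1, some j, p.2.2 + 1)
    | none => (p.1, none, p.2.2 + 1)

def pvCountInside (s : String) (o c : Char) : Int :=
  let fin := s.toList.foldl (pvStepRun o c) (0, none, 0)
  match fin.2.1 with
  | some j => fin.1 + ((s.toList.length : Int) - j)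
  | none => fin.1

def TheTrain_alt (x : String) : List String :=
  let d := pvCountInside x '[' ']'
  let w := pvCountInside x '{' '}'
  let l := pvCountInside x '<' '>'
  let r := pvCountInside x '(' ')'
  [PySem.Str.slice x (some 1) (some d),
   PySem.Str.slice x (some (d + 2)) (some (d + 1 + w)),
   PySem.Str.slice x (some (d + 1 + w + 2)) (some (d + 1 + w + 1 + l)),
   PySem.Str.slice x (some (d + 1 + w + 1 + l + 2)) (some (d + 1 + w + 1 + l + 1 + r))]

-- ===== PRECONDITION & SPEC =====
def Spec_TheTrain (x : String) (out : List String) : Prop := out = TheTrain_alt x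
instance (x : String) (out : List String) : Decidable (Spec_TheTrain x out) := by unfold Spec_TheTrain; infer_instance

-- ===== CLAIM (what is proved, stated in full; the proofs are below) =====
def Claim_equal_TheTrain : Prop := ∀ (x : String), Dom_TheTrain x → Spec_TheTrain x (TheTrain x)

-- ===== LEMMAS AND PROOFS =====

-- one bracket kind of A's fused step, in isolation
def pvStepOne (o c : Char) (p : Int × Bool) (ch : Char) : Int × Bool :=
  let s := if ch = o then true else p.2
  let s := if ch = c then false else s
  (if s then p.1 + 1 else p.1, s)

-- the fused fold is the product of four independent folds
lemma pvFused_eq (cs : List Char) : ∀ (d1 d2 d3 d4 : Int) (s1 s2 s3 s4 : Bool),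
    cs.foldl pvStepAll ((d1, d2, d3, d4), (s1, s2, s3, s4)) =
      (((cs.foldl (pvStepOne '[' ']') (d1, s1)).1,
        (cs.foldl (pvStepOne '{' '}') (d2, s2)).1,
        (cs.foldl (pvStepOne '<' '>') (d3, s3)).1,
        (cs.foldl (pvStepOne '(' ')') (d4, s4)).1),
       ((cs.foldl (pvStepOne '[' ']') (d1, s1)).2,
        (cs.foldl (pvStepOne '{' '}') (d2, s2)).2,
        (cs.foldl (pvStepOne '<' '>') (d3, s3)).2,
        (cs.foldl (pvStepOne '(' ')') (d4, s4)).2)) := by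
  induction cs with
  | nil => intro d1 d2 d3 d4 s1 s2 s3 s4; simp [List.foldl]
  | cons ch cs ih =>
    intro d1 d2 d3 d4 s1 s2 s3 s4
    simp only [List.foldl_cons]
    rw [ih]
    rfl

-- every B-step increments the running index
lemma pvStepRun_snd (o c ch : Char) (p : Int × Option Int × Int) :
    (pvStepRun o c p ch).2.2 = p.2.2 + 1 := by
  unfold pvStepRun
  cases hp : p.2.1 <;> simp only [] <;> split_ifs <;> rfl

-- the B-side fold counts the index up by the length
lemma pvStepRun_index (o c : Char) (cs : List Char) : ∀ (p : Int × Option Int × Int),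
    (cs.foldl (pvStepRun o c) p).2.2 = p.2.2 + cs.length := by
  induction cs with
  | nil => intro p; simp
  | cons ch cs ih =>
    intro p
    simp only [List.foldl_cons, List.length_cons]
    rw [ih, pvStepRun_snd]
    push_cast
    ring

-- the invariant tying A's (count, flag) to B's (total, run-start, index)
def pvInv (a : Int × Bool) (p : Int × Option Int × Int) : Prop :=
  a.2 = p.2.1.isSome ∧ (∀ j, p.2.1 = some j → a.1 = p.1 + (p.2.2 - j)) ∧
    (p.2.1 = none → a.1 = p.1)

lemma pvInv_step (o c : Char) (hoc : o ≠ c) (ch : Char) (a : Int × Bool)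
    (p : Int × Option Int × Int) (h : pvInv a p) :
    pvInv (pvStepOne o c a ch) (pvStepRun o c p ch) := by
  obtain ⟨h1, h2, h3⟩ := h
  by_cases ho : ch = o
  · have hc : ¬ ch = c := by rw [ho]; exact hoc
    cases hp : p.2.1 with
    | none =>
      have hd := h3 hp
      have e1 : pvStepRun o c p ch = (p.1, some p.2.2, p.2.2 + 1) := by
        simp [pvStepRun, hp, ho]
      have e2 : pvStepOne o c a ch = (a.1 + 1, true) := by
        simp [pvStepOne, ho, hoc]
      rw [e1, e2]
      unfold pvInv
      refine ⟨rfl, ?_, ?_⟩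
      · intro j hj; simp only [Option.some.injEq] at hj; dsimp only; omega
      · intro hcontra; simp at hcontra
    | some j =>
      have hd := h2 j hp
      have e1 : pvStepRun o c p ch = (p.1, some j, p.2.2 + 1) := by
        simp [pvStepRun, hp, ho, hoc]
      have e2 : pvStepOne o c a ch = (a.1 + 1, true) := by
        simp [pvStepOne, ho, hoc]
      rw [e1, e2]
      unfold pvInv
      refine ⟨rfl, ?_, ?_⟩
      · intro j2 hj2; simp only [Option.some.injEq] at hj2; dsimp only; omega
      · intro hcontra; simp at hcontra
  · by_cases hc : ch = c
    · cases hp : p.2.1 with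
      | none =>
        have hd := h3 hp
        have e1 : pvStepRun o c p ch = (p.1, none, p.2.2 + 1) := by
          simp [pvStepRun, hp, ho]
        have e2 : pvStepOne o c a ch = (a.1, false) := by
          simp [pvStepOne, hc]
        rw [e1, e2]
        unfold pvInv
        refine ⟨rfl, ?_, ?_⟩
        · intro j hj; simp at hj
        · intro _; exact hd
      | some j =>
        have hd := h2 j hp
        have e1 : pvStepRun o c p ch = (p.1 + (p.2.2 - j), none, p.2.2 + 1) := by
          simp [pvStepRun, hp, hc]
        have e2 : pvStepOne o c a ch = (a.1, false) := by
          simp [pvStepOne, hc]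
        rw [e1, e2]
        unfold pvInv
        refine ⟨rfl, ?_, ?_⟩
        · intro j2 hj2; simp at hj2
        · intro _; dsimp only; omega
    · cases hp : p.2.1 with
      | none =>
        have hd := h3 hp
        have hs : a.2 = false := by simp [h1, hp]
        have e1 : pvStepRun o c p ch = (p.1, none, p.2.2 + 1) := by
          simp [pvStepRun, hp, ho]
        have e2 : pvStepOne o c a ch = (a.1, false) := by
          simp [pvStepOne, ho, hc, hs]
        rw [e1, e2]
        unfold pvInv
        refine ⟨rfl, ?_, ?_⟩
        · intro j hj; simp at hj
        · intro _; exact hd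
      | some j =>
        have hd := h2 j hp
        have hs : a.2 = true := by simp [h1, hp]
        have e1 : pvStepRun o c p ch = (p.1, some j, p.2.2 + 1) := by
          simp [pvStepRun, hp, ho, hc]
        have e2 : pvStepOne o c a ch = (a.1 + 1, true) := by
          simp [pvStepOne, ho, hc, hs]
        rw [e1, e2]
        unfold pvInv
        refine ⟨rfl, ?_, ?_⟩
        · intro j2 hj2; simp only [Option.some.injEq] at hj2; dsimp only; omega
        · intro hcontra; simp at hcontra

lemma pvInv_fold (o c : Char) (hoc : o ≠ c) (cs : List Char) :
    ∀ (a : Int × Bool) (p : Int × Option Int × Int), pvInv a p →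
      pvInv (cs.foldl (pvStepOne o c) a) (cs.foldl (pvStepRun o c) p) := by
  induction cs with
  | nil => intro a p h; exact h
  | cons ch cs ih =>
    intro a p h
    simp only [List.foldl_cons]
    exact ih _ _ (pvInv_step o c hoc ch a p h)

-- A's counter = B's helper, for any distinct bracket pair
lemma pvCount_eq (x : String) (o c : Char) (hoc : o ≠ c) :
    (x.toList.foldl (pvStepOne o c) (0, false)).1 = pvCountInside x o c := by
  unfold pvCountInside
  have h := pvInv_fold o c hoc x.toList (0, false) (0, none, 0) (by
    unfold pvInv
    refine ⟨rfl, ?_, fun _ => rfl⟩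
    intro j hj; simp at hj)
  obtain ⟨h1, h2, h3⟩ := h
  have hi := pvStepRun_index o c x.toList (0, none, 0)
  cases hfin : (x.toList.foldl (pvStepRun o c) (0, none, 0)).2.1 with
  | none => simp only [hfin]; exact h3 hfin
  | some j =>
    simp only [hfin]
    have hd := h2 j hfin
    dsimp only at hi hd ⊢
    omega

-- ===== VERDICT (by name: the statement is the Claim_ definition above) =====
theorem TheTrain_spec : Claim_equal_TheTrain := by
  intro x _
  unfold Spec_TheTrain TheTrain TheTrain_alt
  rw [pvFused_eq]
  rw [pvCount_eq x '[' ']' (by decide), pvCount_eq x '{' '}' (by decide),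
      pvCount_eq x '<' '>' (by decide), pvCount_eq x '(' ')' (by decide)]
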